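-- pv_equiv track=rewrite | github.com/uk2459644/dsa-practice | gfg/pigeonhole/sdivided.py | isDivisibleByDivisor
-- ===== SOURCE A (Python) =====
-- def isDivisibleByDivisor(S,D):
--     S%=D
--     # stores the encountered values
--     hashMap=set()
--     hashMap.add(S)
--
--     for i in range(D+1):
--         S+=(S%D)
--         S%=D
--         # check if the value has already been encountered
--         if (S in hashMap):
--             # Edge case
--             if (S==0):
--                 return "Yes"
--             return "No"
--         # otherwise, insert it into the hashmap
--         else:
--             hashMap.add(S)
--
--     return "Yes"
-- ===== SOURCE B (Python) =====
-- def isDivisibleByDivisor(S, D):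
--     # Strip all factors of 2 from D; the doubling orbit of S mod D reaches 0
--     # iff the odd part of D divides S.
--     d = D
--     while d % 2 == 0:
--         d //= 2
--     return "Yes" if S % d == 0 else "No"
-- ===== Notes on version B (the rewrite author's own statement) =====
-- stated objective: faster
-- what changed: B replaces A's O(D) simulation of the doubling orbit with a hash set by the closed-form criterion: strip all factors of 2 from D and answer Yes iff the remaining odd part divides S.
-- intended difference: For D < 0 whose odd part does not divide S (so the doubling orbit of S mod D never reaches 0), A returns 'Yes' unconditionally because range(D+1) is empty, while B returns the intended 'No'. — e.g. on isDivisibleByDivisor(1, -3): A returns "Yes", B returns "No"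
import Mathlib
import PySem

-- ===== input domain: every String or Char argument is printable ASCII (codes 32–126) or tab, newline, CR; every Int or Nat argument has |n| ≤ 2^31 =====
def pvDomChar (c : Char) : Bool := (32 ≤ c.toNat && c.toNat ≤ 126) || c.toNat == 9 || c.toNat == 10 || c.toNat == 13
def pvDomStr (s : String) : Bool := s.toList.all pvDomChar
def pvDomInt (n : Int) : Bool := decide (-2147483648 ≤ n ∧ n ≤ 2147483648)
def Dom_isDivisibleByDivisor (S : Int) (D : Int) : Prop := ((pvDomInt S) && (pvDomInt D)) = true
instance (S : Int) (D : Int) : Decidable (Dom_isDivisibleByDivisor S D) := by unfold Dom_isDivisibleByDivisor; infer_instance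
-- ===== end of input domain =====

-- B replaces A's O(D) doubling-orbit simulation by the closed criterion "the odd part of D divides S" (O(log D)).

-- ===== PORT A =====
-- the for-loop over range(D+1): remaining iteration count (the loop variable i is unused,
-- so the iterations are counted down lazily, like Python's range), current S, the 'hashMap' set
def loopA (D : Int) : Nat → Int → PySem.Set Int → String
  | 0, _, _ => "Yes"
  | n + 1, S, hm =>
      let S1 := PySem.Int.mod (S + PySem.Int.mod S D) D
      if S1 ∈ hm then (if S1 = 0 then "Yes" else "No")
      else loopA D n S1 (PySem.Set.add hm S1)

def isDivisibleByDivisor (S : Int) (D : Int) : String :=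
  let S0 := PySem.Int.mod S D
  let hm := PySem.Set.add PySem.Set.empty S0
  loopA D (D + 1).toNat S0 hm

-- ===== PORT B =====
-- `while d % 2 == 0: d //= 2`, with |d| as fuel; the `d ≠ 0` conjunct and the fuel only make
-- the recursion total (at d = 0 the Python loop does not terminate; d = 0 is outside Pre_;
-- for d ≠ 0 the fuel |d| is never exhausted).
def stripTwosGo : Nat → Int → Int
  | 0, d => d
  | n + 1, d =>
      if PySem.Int.mod d 2 = 0 ∧ d ≠ 0 then stripTwosGo n (PySem.Int.floordiv d 2) else d

def stripTwos (d : Int) : Int := stripTwosGo d.natAbs d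

def isDivisibleByDivisor_alt (S : Int) (D : Int) : String :=
  if PySem.Int.mod S (stripTwos D) = 0 then "Yes" else "No"

-- ===== PRECONDITION & SPEC =====
-- Pre_ excludes exactly D = 0, where Python A raises ZeroDivisionError (S %= D).
def Pre_isDivisibleByDivisor (S : Int) (D : Int) : Prop := D ≠ 0
instance (S : Int) (D : Int) : Decidable (Pre_isDivisibleByDivisor S D) := by
  unfold Pre_isDivisibleByDivisor; infer_instance
def pvWitness_isDivisibleByDivisor : Int × Int := (6, 4)

-- For D < 0 with no k < 64 such that D divides 2^k*S (i.e. the doubling orbit of S mod D never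
-- reaches 0), A returns "Yes" unconditionally only because range(D+1) is empty, while B returns
-- the intended "No" (odd part of D does not divide S).
def D_isDivisibleByDivisor (S : Int) (D : Int) : Prop :=
  D < 0 ∧ ∀ k ∈ Finset.range 64, ¬ (D ∣ 2 ^ k * S)
instance (S : Int) (D : Int) : Decidable (D_isDivisibleByDivisor S D) := by
  unfold D_isDivisibleByDivisor; infer_instance

def Spec_isDivisibleByDivisor (S : Int) (D : Int) (out : String) : Prop := ¬ D_isDivisibleByDivisor S D → out = isDivisibleByDivisor_alt S D
instance (S : Int) (D : Int) (out : String) : Decidable (Spec_isDivisibleByDivisor S D out) := by unfold Spec_isDivisibleByDivisor; infer_instance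

def pvDiffWitness_isDivisibleByDivisor : Int × Int := (1, -3)
def pvDiffWitnessOut_isDivisibleByDivisor : String × String := ("Yes", "No")

-- ===== CLAIM (what is proved, stated in full; the proofs are below) =====
def Claim_unchanged_isDivisibleByDivisor : Prop := ∀ (S : Int) (D : Int), Dom_isDivisibleByDivisor S D → Pre_isDivisibleByDivisor S D → Spec_isDivisibleByDivisor S D (isDivisibleByDivisor S D)
def Claim_changed_isDivisibleByDivisor : Prop := Dom_isDivisibleByDivisor (pvDiffWitness_isDivisibleByDivisor.1) (pvDiffWitness_isDivisibleByDivisor.2) ∧ Pre_isDivisibleByDivisor (pvDiffWitness_isDivisibleByDivisor.1) (pvDiffWitness_isDivisibleByDivisor.2) ∧ D_isDivisibleByDivisor (pvDiffWitness_isDivisibleByDivisor.1) (pvDiffWitness_isDivisibleByDivisor.2) ∧ isDivisibleByDivisor (pvDiffWitness_isDivisibleByDivisor.1) (pvDiffWitness_isDivisibleByDivisor.2) = pvDiffWitnessOut_isDivisibleByDivisor.1 ∧ isDivisibleByDivisor_alt (pvDiffWitness_isDivisibleByDivisor.1) (pvDiffWitness_isDivisibleByDivisor.2) = pvDiffWitnessOut_isDivisibleByDivisor.2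 ∧ pvDiffWitnessOut_isDivisibleByDivisor.1 ≠ pvDiffWitnessOut_isDivisibleByDivisor.2
def Claim_exact_isDivisibleByDivisor : Prop := ∀ (S : Int) (D : Int), Dom_isDivisibleByDivisor S D → Pre_isDivisibleByDivisor S D → D_isDivisibleByDivisor S D → isDivisibleByDivisor S D ≠ isDivisibleByDivisor_alt S D

-- ===== LEMMAS AND PROOFS =====

-- the doubling orbit of A's loop: orb S0 D k is A's variable S after k iterations
def orb (S0 D : Int) : Nat → Int
  | 0 => S0
  | k + 1 => PySem.Int.mod (orb S0 D k + PySem.Int.mod (orb S0 D k) D) D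

lemma orb_bound (S0 D : Int) (hD : 0 < D) (h0 : 0 ≤ S0 ∧ S0 < D) :
    ∀ k, 0 ≤ orb S0 D k ∧ orb S0 D k < D := by
  intro k
  cases k with
  | zero => exact h0
  | succ k =>
      show 0 ≤ PySem.Int.mod _ D ∧ PySem.Int.mod _ D < D
      rw [PySem.Int.mod_eq_emod_of_pos hD]
      exact ⟨Int.emod_nonneg _ (by omega), Int.emod_lt_of_pos _ hD⟩

lemma orb_succ (S0 D : Int) (hD : 0 < D) (h0 : 0 ≤ S0 ∧ S0 < D) (k : Nat) :
    orb S0 D (k + 1) = (2 * orb S0 D k) % D := by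
  have hb := orb_bound S0 D hD h0 k
  show PySem.Int.mod (orb S0 D k + PySem.Int.mod (orb S0 D k) D) D = _
  rw [PySem.Int.mod_eq_emod_of_pos hD, PySem.Int.mod_eq_emod_of_pos hD,
    Int.emod_eq_of_lt hb.1 hb.2, two_mul]

lemma orb_closed (S0 D : Int) (hD : 0 < D) (h0 : 0 ≤ S0 ∧ S0 < D) :
    ∀ k, orb S0 D k = (2 ^ k * S0) % D := by
  intro k
  induction k with
  | zero => simp [orb, Int.emod_eq_of_lt h0.1 h0.2]
  | succ k ih =>
      rw [orb_succ S0 D hD h0, ih, pow_succ]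
      rw [Int.mul_emod, Int.emod_emod_of_dvd _ dvd_rfl]
      rw [← Int.mul_emod]
      ring_nf

lemma orb_period (S0 D : Int) (a b : Nat) (hab : orb S0 D a = orb S0 D b) :
    ∀ t, orb S0 D (a + t) = orb S0 D (b + t) := by
  intro t
  induction t with
  | zero => simpa using hab
  | succ t ih => show orb S0 D (a + t + 1) = orb S0 D (b + t + 1); rw [orb, orb, ih]

lemma orb_inj_of_min (S0 D : Int) (T : Nat) (hT : orb S0 D T = 0)
    (hmin : ∀ t, t < T → orb S0 D t ≠ 0) :
    ∀ a b, a ≤ T → b ≤ T → orb S0 D a = orb S0 D b → a = b := by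
  have key : ∀ a b, a < b → b ≤ T → orb S0 D a = orb S0 D b → False := by
    intro a b hab hbT he
    have := orb_period S0 D a b he (T - b)
    have h1 : b + (T - b) = T := by omega
    rw [h1, hT] at this
    exact hmin (a + (T - b)) (by omega) this
  intro a b ha hb he
  rcases Nat.lt_trichotomy a b with h | h | h
  · exact absurd he (fun he => key a b h hb he)
  · exact h
  · exact absurd he.symm (fun he => key b a h ha he)

lemma loopA_yes (S0 D : Int) (hD : 0 < D) (h0 : 0 ≤ S0 ∧ S0 < D) (T : Nat)
    (hT : orb S0 D T = 0)
    (hinj : ∀ a b, a ≤ T → b ≤ T → orb S0 D a = orb S0 D b → a = b) :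
    ∀ (n : Nat) (i : Nat), i ≤ T → T + 1 ≤ n + i →
      loopA D n (orb S0 D i) ((List.range (i + 1)).map (orb S0 D)) = "Yes" := by
  intro n
  induction n with
  | zero => intro i hiT hn; omega
  | succ n ih =>
      intro i hiT hn
      show (if orb S0 D (i + 1) ∈ (List.range (i + 1)).map (orb S0 D)
            then (if orb S0 D (i + 1) = 0 then "Yes" else "No")
            else loopA D n (orb S0 D (i + 1))
              (PySem.Set.add ((List.range (i + 1)).map (orb S0 D)) (orb S0 D (i + 1)))) = "Yes"
      by_cases hi : i = T
      · have hz : orb S0 D (i + 1) = 0 := by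
          rw [orb_succ S0 D hD h0, hi, hT]; simp
        have hmem : orb S0 D (i + 1) ∈ (List.range (i + 1)).map (orb S0 D) := by
          simp only [List.mem_map]
          exact ⟨i, by simp, by rw [hz, hi, hT]⟩
        rw [if_pos hmem, if_pos hz]
      · have hiT' : i + 1 ≤ T := by omega
        have hnot : orb S0 D (i + 1) ∉ (List.range (i + 1)).map (orb S0 D) := by
          simp only [List.mem_map, List.mem_range]
          rintro ⟨j, hj, hje⟩
          have := hinj j (i + 1) (by omega) hiT' hje
          omega
        rw [if_neg hnot]
        rw [PySem.Set.add_of_not_mem hnot]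
        have hres : (List.range (i + 1)).map (orb S0 D) ++ [orb S0 D (i + 1)]
            = (List.range (i + 1 + 1)).map (orb S0 D) := by
          simp [List.range_succ]
        rw [hres]
        exact ih (i + 1) hiT' (by omega)

lemma loopA_no (S0 D : Int) (R : Nat)
    (hrep : ∃ j, j ≤ R ∧ orb S0 D (R + 1) = orb S0 D j)
    (hnz : orb S0 D (R + 1) ≠ 0)
    (hinj : ∀ a b, a ≤ R → b ≤ R → orb S0 D a = orb S0 D b → a = b) :
    ∀ (n : Nat) (i : Nat), i ≤ R → R + 1 ≤ n + i →
      loopA D n (orb S0 D i) ((List.range (i + 1)).map (orb S0 D)) = "No" := by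
  intro n
  induction n with
  | zero => intro i hiR hn; omega
  | succ n ih =>
      intro i hiR hn
      show (if orb S0 D (i + 1) ∈ (List.range (i + 1)).map (orb S0 D)
            then (if orb S0 D (i + 1) = 0 then "Yes" else "No")
            else loopA D n (orb S0 D (i + 1))
              (PySem.Set.add ((List.range (i + 1)).map (orb S0 D)) (orb S0 D (i + 1)))) = "No"
      by_cases hi : i = R
      · rcases hrep with ⟨j, hj, hje⟩
        have hmem : orb S0 D (i + 1) ∈ (List.range (i + 1)).map (orb S0 D) := by
          simp only [List.mem_map]
          exact ⟨j, by simp; omega, by rw [hi]; exact hje.symm⟩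
        have hnz' : ¬ orb S0 D (i + 1) = 0 := by rw [hi]; exact hnz
        rw [if_pos hmem, if_neg hnz']
      · have hiR' : i + 1 ≤ R := by omega
        have hnot : orb S0 D (i + 1) ∉ (List.range (i + 1)).map (orb S0 D) := by
          simp only [List.mem_map, List.mem_range]
          rintro ⟨j, hj, hje⟩
          have := hinj j (i + 1) (by omega) hiR' hje
          omega
        rw [if_neg hnot]
        rw [PySem.Set.add_of_not_mem hnot]
        have hres : (List.range (i + 1)).map (orb S0 D) ++ [orb S0 D (i + 1)]
            = (List.range (i + 1 + 1)).map (orb S0 D) := by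
          simp [List.range_succ]
        rw [hres]
        exact ih (i + 1) hiR' (by omega)

-- stripTwos returns the odd part of any nonzero D (with D's sign)
lemma stripTwosGo_spec : ∀ (n : Nat) (d : Int), d.natAbs ≤ n → d ≠ 0 →
    ∃ v : Nat, d = 2 ^ v * stripTwosGo n d ∧ stripTwosGo n d % 2 = 1 ∧ stripTwosGo n d ≠ 0 := by
  intro n
  induction n with
  | zero => intro d hb hd; omega
  | succ n ih =>
      intro d hb hd
      rw [stripTwosGo]
      by_cases h2 : PySem.Int.mod d 2 = 0
      · rw [if_pos ⟨h2, hd⟩]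
        have hq : PySem.Int.floordiv d 2 * 2 + PySem.Int.mod d 2 = d :=
          PySem.Int.floordiv_mul_add_mod d 2
        rw [h2] at hq
        set q := PySem.Int.floordiv d 2 with hqdef
        have hq0 : q ≠ 0 := by omega
        obtain ⟨v, hv1, hv2, hv3⟩ := ih q (by omega) hq0
        refine ⟨v + 1, ?_, hv2, hv3⟩
        calc d = q * 2 := by omega
          _ = (2 ^ v * stripTwosGo n q) * 2 := by rw [← hv1]
          _ = 2 ^ (v + 1) * stripTwosGo n q := by rw [pow_succ]; ring
      · rw [if_neg (by tauto)]
        rw [PySem.Int.mod_eq_emod_of_pos (by norm_num : (0:Int) < 2)] at h2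
        exact ⟨0, by simp, by omega, hd⟩

lemma stripTwos_spec (d : Int) (hd : d ≠ 0) :
    ∃ v : Nat, d = 2 ^ v * stripTwos d ∧ stripTwos d % 2 = 1 ∧ stripTwos d ≠ 0 :=
  stripTwosGo_spec d.natAbs d le_rfl hd

-- odd m dividing 2^t * s divides s
lemma odd_dvd_of_dvd_pow_mul (m s : Int) (hm : m % 2 = 1) (t : Nat) (h : m ∣ 2 ^ t * s) :
    m ∣ s := by
  have h2 : ¬ (2 : Int) ∣ m := by omega
  have hcop : IsCoprime m (2 ^ t : Int) :=
    (((Int.prime_two.coprime_iff_not_dvd).mpr h2).symm).pow_right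
  exact hcop.dvd_of_dvd_mul_left h

-- the crux: for D > 0 the orbit of S0 = S % D hits 0 iff the odd part of D divides S0
lemma main_equiv (S D : Int) (hD : 0 < D) :
    isDivisibleByDivisor S D = isDivisibleByDivisor_alt S D := by
  obtain ⟨v, hv, hodd, hm0⟩ := stripTwos_spec D (by omega)
  set m := stripTwos D with hm
  have hmpos : 0 < m := by
    have h2v := pow_pos (show (0:Int) < 2 by norm_num) v
    nlinarith
  set S0 := S % D with hS0
  have h0 : 0 ≤ S0 ∧ S0 < D := ⟨Int.emod_nonneg _ (by omega), Int.emod_lt_of_pos _ hD⟩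
  -- A's initial state
  have hA : isDivisibleByDivisor S D
      = loopA D (D.toNat + 1) (orb S0 D 0) ((List.range 1).map (orb S0 D)) := by
    show loopA D (D + 1).toNat (PySem.Int.mod S D) (PySem.Set.add PySem.Set.empty (PySem.Int.mod S D)) = _
    rw [PySem.Int.mod_eq_emod_of_pos hD]
    have h1 : (D + 1).toNat = D.toNat + 1 := by omega
    rw [h1]
    rfl
  -- m ∣ S ↔ m ∣ S0
  have hdvd_iff : m ∣ S ↔ m ∣ S0 := by
    have hmD : m ∣ D := ⟨2 ^ v, by rw [hv]; ring⟩
    constructor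
    · intro h; rw [hS0, Int.emod_def]; exact dvd_sub h (hmD.mul_right _)
    · intro h
      have : S = D * (S / D) + S0 := by rw [hS0, Int.emod_def]; ring
      rw [this]; exact dvd_add (hmD.mul_right _) h
  -- B's value
  have hB : isDivisibleByDivisor_alt S D = if m ∣ S0 then "Yes" else "No" := by
    show (if PySem.Int.mod S m = 0 then "Yes" else "No") = _
    rw [PySem.Int.mod_eq_emod_of_pos hmpos]
    by_cases h : m ∣ S0
    · rw [if_pos h, if_pos (Int.emod_eq_zero_of_dvd (hdvd_iff.mpr h))]
    · rw [if_neg h, if_neg (fun hz => h (hdvd_iff.mp (Int.dvd_of_emod_eq_zero hz)))]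
  by_cases hdv : m ∣ S0
  · -- orbit reaches 0: answer "Yes"
    have hzero : orb S0 D v = 0 := by
      rw [orb_closed S0 D hD h0]
      exact Int.emod_eq_zero_of_dvd (by rw [hv]; exact mul_dvd_mul_left _ hdv)
    have hex : ∃ t, orb S0 D t = 0 := ⟨v, hzero⟩
    classical
    let T := Nat.find hex
    have hT : orb S0 D T = 0 := Nat.find_spec hex
    have hmin : ∀ t, t < T → orb S0 D t ≠ 0 := fun t ht => Nat.find_min hex ht
    have hinj := orb_inj_of_min S0 D T hT hmin
    -- T + 1 distinct residues in [0, D) gives T + 1 ≤ D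
    have hTle : T + 1 ≤ D.toNat := by
      have hmaps : ∀ a ∈ Finset.range (T + 1), orb S0 D a ∈ Finset.Ico (0 : Int) D :=
        fun a _ => Finset.mem_Ico.mpr (orb_bound S0 D hD h0 a)
      have hinjOn : Set.InjOn (orb S0 D) (Finset.range (T + 1)) := by
        intro a ha b hb he
        simp only [Finset.coe_range, Set.mem_Iio] at ha hb
        exact hinj a b (by omega) (by omega) he
      have hcard := Finset.card_le_card_of_injOn (orb S0 D) hmaps hinjOn
      simp only [Finset.card_range, Int.card_Ico] at hcard
      omega
    rw [hA, hB, if_pos hdv]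
    exact loopA_yes S0 D hD h0 T hT hinj (D.toNat + 1) 0 (by omega) (by omega)
  · -- orbit never hits 0: answer "No"
    have hnz : ∀ t, orb S0 D t ≠ 0 := by
      intro t ht
      rw [orb_closed S0 D hD h0] at ht
      have : D ∣ 2 ^ t * S0 := Int.dvd_of_emod_eq_zero ht
      have hmd : m ∣ 2 ^ t * S0 := dvd_trans ⟨2 ^ v, by rw [hv]; ring⟩ this
      exact hdv (odd_dvd_of_dvd_pow_mul m S0 hodd t hmd)
    -- pigeonhole: a repeat occurs among orb 0 .. orb D.toNat
    have hpig : ∃ a ∈ Finset.range (D.toNat + 1), ∃ b ∈ Finset.range (D.toNat + 1),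
        a ≠ b ∧ orb S0 D a = orb S0 D b := by
      apply Finset.exists_ne_map_eq_of_card_lt_of_maps_to (t := Finset.Ico (0 : Int) D)
      · simp only [Int.card_Ico, Finset.card_range]; omega
      · intro a _
        exact Finset.mem_Ico.mpr (orb_bound S0 D hD h0 a)
    classical
    obtain ⟨k0, hk0le, hk0⟩ : ∃ k0, k0 ≤ D.toNat ∧ ∃ j, j ≤ k0 ∧ orb S0 D (k0 + 1) = orb S0 D j := by
      obtain ⟨a, ha, b, hb, hne, he⟩ := hpig
      simp only [Finset.mem_range] at ha hb
      rcases Nat.lt_or_ge a b with h | h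
      · exact ⟨b - 1, by omega, a, by omega, by rw [show b - 1 + 1 = b by omega]; exact he.symm⟩
      · have h' : b < a := by omega
        exact ⟨a - 1, by omega, b, by omega, by rw [show a - 1 + 1 = a by omega]; exact he⟩
    have hexQ : ∃ k, ∃ j, j ≤ k ∧ orb S0 D (k + 1) = orb S0 D j := ⟨k0, hk0⟩
    set R := Nat.find hexQ with hR
    obtain ⟨j, hjR, hje⟩ : ∃ j, j ≤ R ∧ orb S0 D (R + 1) = orb S0 D j := Nat.find_spec hexQ
    have hRle : R ≤ D.toNat := le_trans (Nat.find_le hk0) hk0le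
    have hinj : ∀ a b, a ≤ R → b ≤ R → orb S0 D a = orb S0 D b → a = b := by
      have key : ∀ a b, a < b → b ≤ R → orb S0 D a = orb S0 D b → False := by
        intro a b hab hbR he
        have : b - 1 < R := by omega
        exact Nat.find_min hexQ this ⟨a, by omega, by rw [show b - 1 + 1 = b by omega]; exact he.symm⟩
      intro a b ha hb he
      rcases Nat.lt_trichotomy a b with h | h | h
      · exact absurd he (fun he => key a b h hb he)
      · exact h
      · exact absurd he.symm (fun he => key b a h ha he)
    rw [hA, hB, if_neg hdv]
    exact loopA_no S0 D R ⟨j, hjR, hje⟩ (hnz _) hinj (D.toNat + 1) 0 (by omega) (by omega)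

-- A on a negative divisor: range(D+1) is empty, the loop never runs
lemma a_neg (S D : Int) (hD : D < 0) : isDivisibleByDivisor S D = "Yes" := by
  show loopA D (D + 1).toNat _ _ = "Yes"
  have h0 : (D + 1).toNat = 0 := by omega
  rw [h0]
  rfl

-- B answers "Yes" exactly when stripTwos D divides S
lemma b_char (S D : Int) (hD : D ≠ 0) :
    isDivisibleByDivisor_alt S D = if stripTwos D ∣ S then "Yes" else "No" := by
  obtain ⟨v, hv, hodd, hm0⟩ := stripTwos_spec D hD
  show (if PySem.Int.mod S (stripTwos D) = 0 then "Yes" else "No") = _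
  by_cases h : stripTwos D ∣ S
  · rw [if_pos h, if_pos ((PySem.Int.mod_eq_zero_iff_dvd _ _).mpr h)]
  · rw [if_neg h, if_neg (fun hz => h ((PySem.Int.mod_eq_zero_iff_dvd _ _).mp hz))]

-- ===== VERDICT (by name: the statements are the Claim_ definitions above) =====
theorem isDivisibleByDivisor_spec : Claim_unchanged_isDivisibleByDivisor := by
  intro S D hdom hpre hnd
  have hD0 : D ≠ 0 := hpre
  rcases lt_or_gt_of_ne hD0 with hneg | hpos
  · -- D < 0 and ¬D_: some k < 64 has D ∣ 2^k * S, so the odd part of D divides S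
    unfold D_isDivisibleByDivisor at hnd
    obtain ⟨k, _, hk⟩ : ∃ k ∈ Finset.range 64, D ∣ 2 ^ k * S := by
      by_contra hno
      exact hnd ⟨hneg, fun k hk hdvd => hno ⟨k, hk, hdvd⟩⟩
    obtain ⟨v, hv, hodd, hm0⟩ := stripTwos_spec D hD0
    have hmD : stripTwos D ∣ D := ⟨2 ^ v, hv.trans (mul_comm _ _)⟩
    have hdvd : stripTwos D ∣ S :=
      odd_dvd_of_dvd_pow_mul (stripTwos D) S hodd k (dvd_trans hmD hk)
    rw [a_neg S D hneg, b_char S D hD0, if_pos hdvd]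
  · exact main_equiv S D hpos

theorem isDivisibleByDivisor_changed : Claim_changed_isDivisibleByDivisor := by
  unfold Claim_changed_isDivisibleByDivisor; decide

theorem isDivisibleByDivisor_tight : Claim_exact_isDivisibleByDivisor := by
  intro S D hdom hpre hd
  obtain ⟨hneg, hnok⟩ := hd
  have hD0 : D ≠ 0 := hpre
  obtain ⟨v, hv, hodd, hm0⟩ := stripTwos_spec D hD0
  have hnd : ¬ stripTwos D ∣ S := by
    intro hdvd
    -- then D = 2^v * stripTwos D divides 2^v * S, and v ≤ 31 < 64 since |D| ≤ 2^31
    have hk : D ∣ 2 ^ v * S := by rw [hv]; exact mul_dvd_mul_left _ hdvd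
    have hDb : D.natAbs ≤ 2 ^ 31 := by
      have : ((pvDomInt S) && (pvDomInt D)) = true := hdom
      simp only [pvDomInt, Bool.and_eq_true, decide_eq_true_eq] at this
      omega
    have h2v : 2 ^ v ≤ D.natAbs := by
      have habs : D.natAbs = 2 ^ v * (stripTwos D).natAbs := by
        have h1 := congrArg Int.natAbs hv
        rw [Int.natAbs_mul, Int.natAbs_pow] at h1
        simpa using h1
      have hm1 : 1 ≤ (stripTwos D).natAbs := by omega
      calc 2 ^ v = 2 ^ v * 1 := by ring
        _ ≤ 2 ^ v * (stripTwos D).natAbs := Nat.mul_le_mul_left _ hm1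
        _ = D.natAbs := habs.symm
    have hv31 : v ≤ 31 := by
      by_contra hgt
      have : (2 : Nat) ^ 32 ≤ 2 ^ v := Nat.pow_le_pow_right (by norm_num) (by omega)
      have : (2 : Nat) ^ 32 ≤ 2 ^ 31 := by omega
      norm_num at this
    exact hnok v (Finset.mem_range.mpr (by omega)) hk
  rw [a_neg S D hneg, b_char S D hD0, if_neg hnd]
  decide
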